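-- pv_equiv track=rewrite | github.com/Mrunal321/Folded_Bias-Decomposition | Extra_code/HW+th.py | add_with_cout
-- ===== SOURCE A (Python) =====
-- def add_with_cout(a, b, bits):
--     # """Binary addition of a and b with fixed 'bits' width; return carry-out."""
--     carry = 0
--     for i in range(bits):
--         abit = (a >> i) & 1
--         bbit = (b >> i) & 1
--         total = abit + bbit + carry
--         carry = 1 if total >= 2 else 0
--     return carry
-- ===== SOURCE B (Python) =====
-- def add_with_cout(a, b, bits):
--     m = 1 << bits
--     return (a % m + b % m) >> bits
-- ===== Notes on version B (the rewrite author's own statement) =====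
-- stated objective: faster
-- what changed: replaces the bit-by-bit carry-propagation loop by the closed form ((a mod 2^bits) + (b mod 2^bits)) >> bits, one modular addition instead of 'bits' loop iterations
-- outside the precondition, e.g. on add_with_cout(0, 0, -1): A returns 0, B raises ValueError
import Mathlib
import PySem

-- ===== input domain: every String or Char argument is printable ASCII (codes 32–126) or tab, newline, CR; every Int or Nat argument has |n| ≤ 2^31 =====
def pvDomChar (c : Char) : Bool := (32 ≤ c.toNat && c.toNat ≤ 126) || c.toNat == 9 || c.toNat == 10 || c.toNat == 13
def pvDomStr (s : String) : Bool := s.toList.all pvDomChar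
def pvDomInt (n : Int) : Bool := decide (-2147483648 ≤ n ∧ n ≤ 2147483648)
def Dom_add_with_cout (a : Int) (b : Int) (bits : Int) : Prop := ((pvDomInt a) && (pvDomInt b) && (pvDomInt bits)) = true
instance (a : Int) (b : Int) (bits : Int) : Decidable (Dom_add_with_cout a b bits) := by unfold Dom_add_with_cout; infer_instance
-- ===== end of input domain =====

-- B replaces A's bit-by-bit carry-propagation loop by the closed form
-- ((a mod 2^bits) + (b mod 2^bits)) >> bits (objective: faster, O(1) instead of O(bits)).

-- ===== PORT A =====
-- literal port of A: carry loop over range(bits); (a >> i) & 1 is '>>> i.toNat' / PySem.Int.band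
def add_with_cout (a : Int) (b : Int) (bits : Int) : Int :=
  (PySem.List.pyRange 0 bits 1).foldl (fun carry i =>
    let abit := PySem.Int.band (a >>> i.toNat) 1
    let bbit := PySem.Int.band (b >>> i.toNat) 1
    let total := abit + bbit + carry
    if total ≥ 2 then 1 else 0) 0

-- ===== PORT B =====
-- literal port of Source B: m = 1 << bits; (a % m + b % m) >> bits
def add_with_cout_alt (a : Int) (b : Int) (bits : Int) : Int :=
  let m := (1 : Int) <<< bits.toNat
  (PySem.Int.mod a m + PySem.Int.mod b m) >>> bits.toNat

-- ===== PRECONDITION & SPEC =====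
-- Pre_ excludes bits < 0, where B's '1 << bits' raises ValueError while A's empty loop returns 0.
def Pre_add_with_cout (a : Int) (b : Int) (bits : Int) : Prop := 0 ≤ bits
instance (a : Int) (b : Int) (bits : Int) : Decidable (Pre_add_with_cout a b bits) := by unfold Pre_add_with_cout; infer_instance
def pvWitness_add_with_cout : Int × Int × Int := (3, 5, 3)

def Spec_add_with_cout (a : Int) (b : Int) (bits : Int) (out : Int) : Prop := out = add_with_cout_alt a b bits
instance (a : Int) (b : Int) (bits : Int) (out : Int) : Decidable (Spec_add_with_cout a b bits out) := by unfold Spec_add_with_cout; infer_instance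

-- ===== CLAIM (what is proved, stated in full; the proofs are below) =====
def Claim_equal_add_with_cout : Prop := ∀ (a : Int) (b : Int) (bits : Int), Dom_add_with_cout a b bits → Pre_add_with_cout a b bits → Spec_add_with_cout a b bits (add_with_cout a b bits)

-- ===== LEMMAS AND PROOFS =====

-- x / m is the indicator 'm ≤ x' when 0 ≤ x < 2m
lemma pv_div01 (x m : Int) (hm : 0 < m) (h0 : 0 ≤ x) (h2 : x < 2 * m) :
    x / m = if m ≤ x then 1 else 0 := by
  split_ifs with h
  · have hx : x = (x - m) + m * 1 := by ring
    rw [hx, Int.add_mul_ediv_left _ _ (by omega : m ≠ 0),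
        Int.ediv_eq_zero_of_lt (by omega) (by omega)]
    ring
  · exact Int.ediv_eq_zero_of_lt h0 (by omega)

-- a mod 2P peels off one more bit: a % (2*P) = a % P + P * ((a/P) % 2)
lemma pv_emod_twoP (a P : Int) (hP : 0 < P) :
    a % (2 * P) = a % P + P * ((a / P) % 2) := by
  have e1 : P * (a / P) + a % P = a := Int.mul_ediv_add_emod a P
  have e2 : 2 * (a / P / 2) + (a / P) % 2 = a / P := Int.mul_ediv_add_emod (a / P) 2
  have hA0 : 0 ≤ a % P := Int.emod_nonneg a (by omega)
  have hA1 : a % P < P := Int.emod_lt_of_pos a hP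
  have he : (a / P) % 2 = 0 ∨ (a / P) % 2 = 1 := Int.emod_two_eq_zero_or_one (a / P)
  have hx : a = (a % P + P * ((a / P) % 2)) + (2 * P) * (a / P / 2) := by
    linear_combination -e1 - P * e2
  have hr0 : 0 ≤ a % P + P * ((a / P) % 2) := by rcases he with h | h <;> rw [h] <;> omega
  have hr1 : a % P + P * ((a / P) % 2) < 2 * P := by rcases he with h | h <;> rw [h] <;> omega
  have hy : a % (2 * P) = ((a % P + P * ((a / P) % 2)) + (2 * P) * (a / P / 2)) % (2 * P) := by
    rw [← hx]
  rw [hy, Int.add_mul_emod_self_left, Int.emod_eq_of_lt hr0 hr1]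

-- one loop step of A equals one more bit of the closed form
lemma pv_step_arith (a b P : Int) (hP : 0 < P) :
    (if 2 ≤ a / P % 2 + b / P % 2 + (a % P + b % P) / P then (1 : Int) else 0)
      = (a % (2 * P) + b % (2 * P)) / (2 * P) := by
  have hA0 : 0 ≤ a % P := Int.emod_nonneg a (by omega)
  have hA1 : a % P < P := Int.emod_lt_of_pos a hP
  have hB0 : 0 ≤ b % P := Int.emod_nonneg b (by omega)
  have hB1 : b % P < P := Int.emod_lt_of_pos b hP
  have hea : a / P % 2 = 0 ∨ a / P % 2 = 1 := Int.emod_two_eq_zero_or_one _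
  have heb : b / P % 2 = 0 ∨ b / P % 2 = 1 := Int.emod_two_eq_zero_or_one _
  rw [pv_emod_twoP a P hP, pv_emod_twoP b P hP,
      show a % P + P * (a / P % 2) + (b % P + P * (b / P % 2))
         = a % P + b % P + (P * (a / P % 2) + P * (b / P % 2)) from by ring,
      pv_div01 (a % P + b % P) P hP (by omega) (by omega),
      pv_div01 (a % P + b % P + (P * (a / P % 2) + P * (b / P % 2)))
        (2 * P) (by omega) (by rcases hea with h | h <;> rcases heb with h' | h' <;> rw [h, h'] <;> omega)
        (by rcases hea with h | h <;> rcases heb with h' | h' <;> rw [h, h'] <;> omega)]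
  rcases hea with h | h <;> rcases heb with h' | h' <;> rw [h, h'] <;> split_ifs <;> omega

-- the loop invariant: after n iterations the carry is ((a mod 2^n)+(b mod 2^n)) / 2^n
lemma pv_carry_loop (a b : Int) (n : Nat) :
    (PySem.List.pyRange 0 (n : Int) 1).foldl (fun carry i =>
      let abit := PySem.Int.band (a >>> i.toNat) 1
      let bbit := PySem.Int.band (b >>> i.toNat) 1
      let total := abit + bbit + carry
      if total ≥ 2 then 1 else 0) 0
    = (a % 2 ^ n + b % 2 ^ n) / 2 ^ n := by
  induction n with
  | zero => simp
  | succ n ih =>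
    rw [show ((n + 1 : Nat) : Int) = (n : Int) + 1 from by push_cast; ring,
        PySem.List.pyRange_one_succ_right (by positivity), List.foldl_append, ih]
    simp only [List.foldl_cons, List.foldl_nil,
      Int.toNat_natCast, PySem.Int.band_one,
      PySem.Int.mod_eq_emod_of_pos (by norm_num : (0:Int) < 2), ge_iff_le]
    simp only [Int.shiftRight_natCast_right, Int.shiftRight_eq_div_pow]
    push_cast
    rw [show (2 : Int) ^ (n + 1) = 2 * 2 ^ n from by ring,
        ← pv_step_arith a b (2 ^ n) (by positivity)]

-- ===== VERDICT (by name: the statement is the Claim_ definition above) =====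
theorem add_with_cout_spec : Claim_equal_add_with_cout := by
  intro a b bits _ hpre
  unfold Spec_add_with_cout add_with_cout add_with_cout_alt
  obtain ⟨n, rfl⟩ : ∃ n : Nat, bits = (n : Int) := ⟨bits.toNat, (Int.toNat_of_nonneg hpre).symm⟩
  rw [pv_carry_loop a b n]
  simp [Int.shiftLeft_eq, Int.shiftRight_eq_div_pow]
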